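-- pv_equiv track=rewrite | github.com/dungnguyen1709/Python_baitap | ex3_6.py | solve
-- ===== SOURCE A (Python) =====
-- def solve(input_data):
--     '''Trả về 1 `tuple` chứa 2 phần tử, ví dụ:
--
--         input_data: 2
--         output: ("February", 28)
--
--     :param input_data: tháng bất kì
--     :rtype: tuple
--     '''
--     result = None
--     data = [("January", 31), ("February", 28), ("March", 31), ("April", 30), ("May", 31), ("June", 30),
--             ("July", 31),
--             ("August", 31), ("September", 30), ("October", 31), ("November", 30), ("December", 31)]
--
--     for i in range(1, 13):
--         if input_data == i:
--             result = data[i - 1]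
--     return result
-- ===== SOURCE B (Python) =====
-- def solve(input_data):
--     if input_data not in range(1, 13):
--         return None
--     names = ["January", "February", "March", "April", "May", "June",
--              "July", "August", "September", "October", "November", "December"]
--     days = 28 if input_data == 2 else 30 + (input_data + input_data // 8) % 2
--     return (names[input_data - 1], days)
-- ===== Notes on version B (the rewrite author's own statement) =====
-- stated objective: alternative
-- what changed: Replaces the per-month equality scan over a (name, days) table with a range guard, direct indexing into the name list, and an arithmetic closed form for the day count (February special-cased, otherwise thirty plus (m + m//8) mod two) instead of storing the day counts at all.
import Mathlib
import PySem

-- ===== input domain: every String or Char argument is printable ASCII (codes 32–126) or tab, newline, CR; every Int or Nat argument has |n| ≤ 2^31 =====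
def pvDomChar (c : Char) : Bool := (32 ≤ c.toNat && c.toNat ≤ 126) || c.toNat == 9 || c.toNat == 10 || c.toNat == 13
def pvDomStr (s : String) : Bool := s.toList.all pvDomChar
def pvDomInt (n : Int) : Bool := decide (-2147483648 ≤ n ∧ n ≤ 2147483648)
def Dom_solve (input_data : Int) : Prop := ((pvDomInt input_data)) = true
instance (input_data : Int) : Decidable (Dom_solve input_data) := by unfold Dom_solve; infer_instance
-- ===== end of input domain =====

-- ===== PORT A =====
-- Header: B drops the (name, days) scan table: a range guard, direct name indexing, and a closed-form
-- day-count formula (28 for February, else 30 + (m + m//8) % 2) replace A's 12-way equality scan (alternative, same values).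
def pvData : List (String × Int) :=
  [("January", 31), ("February", 28), ("March", 31), ("April", 30), ("May", 31), ("June", 30),
   ("July", 31),
   ("August", 31), ("September", 30), ("October", 31), ("November", 30), ("December", 31)]

def solve (input_data : Int) : Option (String × Int) :=
  (PySem.List.pyRange 1 13 1).foldl
    (fun result i => if input_data == i then PySem.List.pyGet? pvData (i - 1) else result)
    none

-- ===== PORT B =====
def pvNames : List String :=
  ["January", "February", "March", "April", "May", "June",
   "July", "August", "September", "October", "November", "December"]

def solve_alt (input_data : Int) : Option (String × Int) :=
  if ¬ (1 ≤ input_data ∧ input_data ≤ 12) then none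
  else
    match PySem.List.pyGet? pvNames (input_data - 1) with
    | none => none
    | some name =>
      some (name,
        if input_data == 2 then 28
        else 30 + PySem.Int.mod (input_data + PySem.Int.floordiv input_data 8) 2)

-- ===== PRECONDITION & SPEC =====
def Spec_solve (input_data : Int) (out : Option (String × Int)) : Prop := out = solve_alt input_data
instance (input_data : Int) (out : Option (String × Int)) : Decidable (Spec_solve input_data out) := by unfold Spec_solve; infer_instance

-- ===== CLAIM =====
def Claim_equal_solve : Prop := ∀ (input_data : Int), Dom_solve input_data → Spec_solve input_data (solve input_data)

-- ===== LEMMAS AND PROOFS =====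

-- ===== VERDICT =====
theorem solve_spec : Claim_equal_solve := by
  intro x _
  unfold Spec_solve
  by_cases h1 : x = 1;  · subst h1; decide
  by_cases h2 : x = 2;  · subst h2; decide
  by_cases h3 : x = 3;  · subst h3; decide
  by_cases h4 : x = 4;  · subst h4; decide
  by_cases h5 : x = 5;  · subst h5; decide
  by_cases h6 : x = 6;  · subst h6; decide
  by_cases h7 : x = 7;  · subst h7; decide
  by_cases h8 : x = 8;  · subst h8; decide
  by_cases h9 : x = 9;  · subst h9; decide
  by_cases h10 : x = 10; · subst h10; decide
  by_cases h11 : x = 11; · subst h11; decide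
  by_cases h12 : x = 12; · subst h12; decide
  have hr : PySem.List.pyRange 1 13 1 = [1, 2, 3, 4, 5, 6, 7, 8, 9, 10, 11, 12] := by decide
  have hout : ¬ (1 ≤ x ∧ x ≤ 12) := by omega
  simp [solve, solve_alt, hr, List.foldl, hout,
        h1, h2, h3, h4, h5, h6, h7, h8, h9, h10, h11, h12]
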